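-- pv_equiv track=rewrite | github.com/trosh/dmenu-bookmarks | bookmarks.py | determine_url
-- ===== SOURCE A (Python) =====
-- PREFIXES = {
--     "g"   : ("+", "https://www.google.com/search?q="),
--     "gi"  : ("+", "https://www.google.com/search?tbm=isch&q="), # Image search
--     "d"   : ("+", "https://www.duckduckgo.com/?q="),
--     "y"   : ("+", "https://www.youtube.com/results?search_query="),
--     "yt"  : ("+", "https://www.youtube.com/results?search_query="),
--     "w"   : ("+", "https://en.wikipedia.org/w/index.php?search="),
--     "we"  : ("+", "https://en.wikipedia.org/w/index.php?search="),
--     "wf"  : ("+", "https://fr.wikipedia.org/w/index.php?search="),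
--     "wp"  : (" ", "https://en.wikipedia.org/wiki/"), # Exact page name
--     "wpe" : (" ", "https://en.wikipedia.org/wiki/"),
--     "wpf" : (" ", "https://fr.wikipedia.org/wiki/"),
-- }
--
-- def build_search(prefix, query, sep):
--     """
--     Create search URL
--     @param  prefix  Base search URL
--     @param  query   Space-separated search query
--     @return  Search URL ready for browser
--     """
--     return prefix + query.replace(" ", sep)
--
-- def determine_url(result):
--     """
--     Choose what URL to pass to browser based on user input
--     @param  result  User-given string typed in dmenu
--     @return  Protocol-prefixed URL ready for browser
--     """
--     # Is `result` a fully formed URL ?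
--     if "://" in result:
--         url = result
--     else:
--         # Is `result` a search pattern ?
--         for accro, prefix in PREFIXES.items():
--             if result.startswith(accro + " "):
--                 url = build_search(prefix[1],
--                                    result[len(accro)+1:],
--                                    prefix[0])
--                 break
--         else:
--             # Is `result` a partially formed URL  ?
--             if " " not in result and "." in result:
--                 url = "https://" + result
--             # Default : duckduckgo search
--             else:
--                 sep, prefix = PREFIXES["d"]
--                 url = build_search(prefix, result, sep)
--     return url
-- ===== SOURCE B (Python) =====
-- PREFIXES = {
--     "g"   : ("+", "https://www.google.com/search?q="),
--     "gi"  : ("+", "https://www.google.com/search?tbm=isch&q="), # Image search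
--     "d"   : ("+", "https://www.duckduckgo.com/?q="),
--     "y"   : ("+", "https://www.youtube.com/results?search_query="),
--     "yt"  : ("+", "https://www.youtube.com/results?search_query="),
--     "w"   : ("+", "https://en.wikipedia.org/w/index.php?search="),
--     "we"  : ("+", "https://en.wikipedia.org/w/index.php?search="),
--     "wf"  : ("+", "https://fr.wikipedia.org/w/index.php?search="),
--     "wp"  : (" ", "https://en.wikipedia.org/wiki/"), # Exact page name
--     "wpe" : (" ", "https://en.wikipedia.org/wiki/"),
--     "wpf" : (" ", "https://fr.wikipedia.org/wiki/"),
-- }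
--
-- def determine_url(result):
--     """
--     Tokenize-then-join strategy: instead of scanning PREFIXES with startswith
--     and doing substring surgery (slice + replace), split the input once into
--     its space-separated words and express every branch over that word list.
--     """
--     # Fully formed URL: pass through unchanged
--     if "://" in result:
--         return result
--     words = result.split(" ")
--     # Search pattern: more than one word and the first word is a known accro
--     if len(words) > 1 and words[0] in PREFIXES:
--         sep, prefix = PREFIXES[words[0]]
--         return prefix + sep.join(words[1:])
--     # Partially formed URL: a single word containing a dot
--     if len(words) == 1 and "." in words[0]:
--         return "https://" + result
--     # Default: duckduckgo search
--     sep, prefix = PREFIXES["d"]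
--     return prefix + sep.join(words)
-- ===== Notes on version B (the rewrite author's own statement) =====
-- stated objective: alternative
-- what changed: B tokenizes the input once into its space-separated word list and phrases every branch over that list (dict lookup of words[0], sep.join of the remaining words, len(words)==1 for the no-space test), eliminating A's startswith scan over PREFIXES.items(), its slice result[len(accro)+1:] and its str.replace calls.
import Mathlib
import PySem

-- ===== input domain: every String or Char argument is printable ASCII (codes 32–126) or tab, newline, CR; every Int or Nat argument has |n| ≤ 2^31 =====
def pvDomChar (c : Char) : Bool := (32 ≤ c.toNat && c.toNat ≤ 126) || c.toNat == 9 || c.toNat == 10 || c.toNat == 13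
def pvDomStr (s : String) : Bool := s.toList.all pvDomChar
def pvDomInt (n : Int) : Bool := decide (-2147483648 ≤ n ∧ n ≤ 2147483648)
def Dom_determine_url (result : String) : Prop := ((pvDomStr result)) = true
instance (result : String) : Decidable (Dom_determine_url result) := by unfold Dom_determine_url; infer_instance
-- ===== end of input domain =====

-- B tokenizes the input once into its space-separated word list and phrases every branch
-- over that list (dict lookup of words[0], sep.join of the tail, len==1 for the no-space
-- test), instead of A's startswith scan over PREFIXES plus slicing and str.replace
-- (objective: alternative).

-- ===== PORT A =====
-- the module-level PREFIXES dict: association list in insertion order (the dict has no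
-- duplicate keys, so iteration and lookup are exactly the list's order / first match)
def PREFIXES : List (String × String × String) := [
  ("g", "+", "https://www.google.com/search?q="),
  ("gi", "+", "https://www.google.com/search?tbm=isch&q="),
  ("d", "+", "https://www.duckduckgo.com/?q="),
  ("y", "+", "https://www.youtube.com/results?search_query="),
  ("yt", "+", "https://www.youtube.com/results?search_query="),
  ("w", "+", "https://en.wikipedia.org/w/index.php?search="),
  ("we", "+", "https://en.wikipedia.org/w/index.php?search="),
  ("wf", "+", "https://fr.wikipedia.org/w/index.php?search="),
  ("wp", " ", "https://en.wikipedia.org/wiki/"),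
  ("wpe", " ", "https://en.wikipedia.org/wiki/"),
  ("wpf", " ", "https://fr.wikipedia.org/wiki/")]

def build_search (prfx query sep : String) : String :=
  prfx ++ PySem.Str.replace query " " sep

-- A's partial-URL / duckduckgo default (the for/else clause)
def pvFallback (result : String) : String :=
  if !PySem.Str.isIn " " result && PySem.Str.isIn "." result then
    "https://" ++ result
  else
    -- sep, prefix = PREFIXES["d"]: exact, the key "d" is present in the literal dict
    match PREFIXES.lookup "d" with
    | some (sep, prfx) => build_search prfx result sep
    | none => ""  -- unreachable

-- A's for/else loop over PREFIXES.items(): break returns the search URL,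
-- the else clause fires at exhaustion
def pvScanA (result : String) : List (String × String × String) → String
  | [] => pvFallback result
  | (accro, sep, prfx) :: rest =>
    if PySem.Str.startswith result (accro ++ " ") then
      build_search prfx (PySem.Str.slice result (some (PySem.Str.len accro + 1)) none) sep
    else pvScanA result rest

def determine_url (result : String) : String :=
  if PySem.Str.isIn "://" result then result
  else pvScanA result PREFIXES

-- ===== PORT B =====
-- B's two trailing early-return branches (single word with a dot / duckduckgo default)
def pvTailB (result : String) (words : List String) : String :=
  if words.length == 1 && PySem.Str.isIn "." (words.headD "") then
    "https://" ++ result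
  else
    match PREFIXES.lookup "d" with
    | some (sep, prfx) => prfx ++ PySem.Str.join sep words
    | none => ""  -- unreachable

def determine_url_alt (result : String) : String :=
  if PySem.Str.isIn "://" result then result
  else
    -- words = result.split(" "): the separator " " is non-empty, so Python's split
    -- is exactly Chars.splitOn (PySem.Str.split? would return `some` of this list)
    let words := (PySem.Chars.splitOn result.toList [' ']).map String.ofList
    if 1 < words.length then
      -- words[0] in PREFIXES / PREFIXES[words[0]]: one association-list lookup
      match PREFIXES.lookup (words.headD "") with
      | some (sep, prfx) => prfx ++ PySem.Str.join sep words.tail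
      | none => pvTailB result words
    else pvTailB result words

-- ===== PRECONDITION & SPEC =====
def Spec_determine_url (result : String) (out : String) : Prop := out = determine_url_alt result
instance (result : String) (out : String) : Decidable (Spec_determine_url result out) := by unfold Spec_determine_url; infer_instance

-- ===== CLAIM (what is proved, stated in full; the proofs are below) =====
def Claim_equal_determine_url : Prop := ∀ (result : String), Dom_determine_url result → Spec_determine_url result (determine_url result)

-- ===== LEMMAS AND PROOFS =====

-- `k + " "` is a prefix of cs iff k is exactly the segment before the first space
-- (and that space exists), for a space-free key k
lemma prefix_key (k : List Char) (hk : ' ' ∉ k) (cs : List Char) :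
    (k ++ [' ']) <+: cs ↔
      (cs.takeWhile (fun c => c ≠ ' ') = k ∧ k.length < cs.length) := by
  induction k generalizing cs with
  | nil =>
    cases cs with
    | nil => simp
    | cons c cs' =>
      by_cases h : c = ' '
      · simp [List.cons_prefix_cons, List.takeWhile, h]
      · simp [List.cons_prefix_cons, List.takeWhile, h, Ne.symm h]
  | cons a k' ih =>
    have ha : a ≠ ' ' := by rintro rfl; exact hk (List.mem_cons_self ..)
    have hk' : ' ' ∉ k' := fun h => hk (List.mem_cons_of_mem _ h)
    cases cs with
    | nil => simp
    | cons c cs' =>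
      by_cases h : c = a
      · subst h
        simp [List.cons_prefix_cons, List.takeWhile, ha, ih hk']
      · by_cases h2 : c = ' ' <;>
          simp [List.cons_prefix_cons, List.takeWhile, h, h2, ha, Ne.symm h]

lemma startswith_key (s : String) (k : String) (hk : ' ' ∉ k.toList) :
    PySem.Str.startswith s (k ++ " ") =
      (s.toList.takeWhile (fun c => c ≠ ' ') == k.toList
        && decide (k.toList.length < s.toList.length)) := by
  rw [Bool.eq_iff_iff, Bool.and_eq_true, beq_iff_eq, decide_eq_true_iff]
  have h : (k ++ " ").toList = k.toList ++ [' '] := by simp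
  rw [show PySem.Str.startswith s (k ++ " ") = PySem.Chars.startswith s.toList (k ++ " ").toList from by simp,
      h, PySem.Chars.startswith_iff, prefix_key k.toList hk s.toList]

lemma beq_ofList (a : List Char) (b : String) : (String.ofList a == b) = (a == b.toList) := by
  rw [Bool.eq_iff_iff, beq_iff_eq, beq_iff_eq]
  constructor
  · rintro rfl; simp
  · rintro rfl; exact String.ofList_toList

lemma slice_drop (s : String) (n : Nat) :
    PySem.Str.slice s (some ((n : Nat) : Int)) none = String.ofList (s.toList.drop n) := by
  apply String.toList_inj.mp
  simp only [PySem.Str.toList_slice, PySem.Chars.slice_eq_listSlice,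
    PySem.List.slice_from_natCast, String.toList_ofList]

-- A's scan over any space-free-keyed prefix list computes "partition at the first
-- space, then look the first word up"
lemma scan_eq (result : String) (l : List (String × String × String))
    (hl : ∀ p ∈ l, ' ' ∉ p.1.toList) :
    pvScanA result l =
      (if (result.toList.takeWhile (fun c => c ≠ ' ')).length < result.toList.length then
        match l.lookup (String.ofList (result.toList.takeWhile (fun c => c ≠ ' '))) with
        | some (sep, prfx) =>
            build_search prfx
              (String.ofList (result.toList.drop
                ((result.toList.takeWhile (fun c => c ≠ ' ')).length + 1))) sep
        | none => pvFallback result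
      else pvFallback result) := by
  set t := result.toList.takeWhile (fun c => c ≠ ' ') with ht
  induction l with
  | nil => simp [pvScanA, List.lookup]
  | cons p rest ih =>
    obtain ⟨k, sep, prfx⟩ := p
    have hk : ' ' ∉ k.toList := hl _ (List.mem_cons_self ..)
    have hrest : ∀ p ∈ rest, ' ' ∉ p.1.toList := fun p hp => hl p (List.mem_cons_of_mem _ hp)
    rw [pvScanA, startswith_key result k hk, ← ht]
    by_cases he : t = k.toList
    · by_cases hsp : t.length < result.toList.length
      · have hc : (t == k.toList && decide (k.toList.length < result.toList.length)) = true := by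
          have hsp' := hsp; rw [he] at hsp'
          simp only [he, beq_self_eq_true, Bool.true_and, decide_eq_true_iff]
          simpa using hsp'
        rw [hc, if_pos rfl, if_pos hsp]
        have hbeq : (String.ofList t == k) = true := by
          rw [beq_ofList]; exact beq_iff_eq.mpr he
        rw [List.lookup, hbeq]
        have hlen : PySem.Str.len k + 1 = ((k.toList.length + 1 : Nat) : Int) := by
          simp [PySem.Str.len_eq]
        rw [hlen, slice_drop, he]
      · have hc : (t == k.toList && decide (k.toList.length < result.toList.length)) = false := by
          have hsp' := hsp; rw [he] at hsp'
          simp only [he, beq_self_eq_true, Bool.true_and, decide_eq_false_iff_not]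
          simpa using hsp'
        rw [hc, if_neg (by simp), ih hrest, if_neg hsp, if_neg hsp]
    · have hc : (t == k.toList && decide (k.toList.length < result.toList.length)) = false := by
        simp [he]
      have hbeq : (String.ofList t == k) = false := by
        rw [beq_ofList]; exact beq_eq_false_iff_ne.mpr (by simpa using he)
      rw [hc, if_neg (by simp), ih hrest, List.lookup, hbeq]

-- reference splitter: (first word, remaining words) of a split at every single space
def pvSplit1 : List Char → List Char × List (List Char)
  | [] => ([], [])
  | c :: t =>
    if c = ' ' then ([], (pvSplit1 t).1 :: (pvSplit1 t).2)
    else (c :: (pvSplit1 t).1, (pvSplit1 t).2)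

lemma splitOn_go_eq (fuel : Nat) (l cur : List Char) (acc : List (List Char))
    (h : l.length ≤ fuel) :
    PySem.Chars.splitOn.go [' '] fuel l cur acc =
      acc.reverse ++ (cur.reverse ++ (pvSplit1 l).1) :: (pvSplit1 l).2 := by
  induction fuel generalizing l cur acc with
  | zero =>
    obtain rfl : l = [] := List.eq_nil_of_length_eq_zero (Nat.le_zero.mp h)
    rw [PySem.Chars.splitOn.go]; simp [pvSplit1]
  | succ fuel ih =>
    cases l with
    | nil => rw [PySem.Chars.splitOn.go] <;> simp [pvSplit1]
    | cons c rest =>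
      rw [PySem.Chars.splitOn.go]
      by_cases hc : c = ' '
      · subst hc
        have hp : [' '].isPrefixOf (' ' :: rest) = true := by simp [List.isPrefixOf]
        rw [if_pos hp]
        simp only [List.length_singleton, List.drop_one, List.tail_cons]
        rw [ih rest [] _ (by simpa using Nat.le_of_succ_le_succ (by simpa using h))]
        simp [pvSplit1]
      · have hp : [' '].isPrefixOf (c :: rest) = false := by
          simp [List.isPrefixOf]; exact fun hh => absurd hh.symm hc
        rw [if_neg (by simp [hp])]
        rw [ih rest (c :: cur) acc (Nat.le_of_succ_le_succ (by simpa using h))]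
        simp [pvSplit1, hc]

lemma chars_splitOn_space (s : List Char) :
    PySem.Chars.splitOn s [' '] = (pvSplit1 s).1 :: (pvSplit1 s).2 := by
  rw [show PySem.Chars.splitOn s [' '] = PySem.Chars.splitOn.go [' '] (s.length + 1) s [] [] from rfl]
  rw [splitOn_go_eq _ _ _ _ (Nat.le_succ _)]
  simp

lemma join_cons_head (new : List Char) (c : Char) (w : List Char) (ws : List (List Char)) :
    PySem.Chars.join new ((c :: w) :: ws) = c :: PySem.Chars.join new (w :: ws) := by
  cases ws with
  | nil => rw [PySem.Chars.join_singleton, PySem.Chars.join_singleton]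
  | cons q rest => rw [PySem.Chars.join_cons_cons, PySem.Chars.join_cons_cons]; simp

lemma replace_go_eq (new : List Char) (fuel : Nat) (l acc : List Char)
    (h : l.length ≤ fuel) :
    PySem.Chars.replace.go [' '] new fuel l acc =
      acc.reverse ++ PySem.Chars.join new ((pvSplit1 l).1 :: (pvSplit1 l).2) := by
  induction fuel generalizing l acc with
  | zero =>
    obtain rfl : l = [] := List.eq_nil_of_length_eq_zero (Nat.le_zero.mp h)
    rw [PySem.Chars.replace.go]; simp [pvSplit1, PySem.Chars.join_singleton]
  | succ fuel ih =>
    cases l with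
    | nil => rw [PySem.Chars.replace.go] <;> simp [pvSplit1, PySem.Chars.join_singleton]
    | cons c rest =>
      rw [PySem.Chars.replace.go]
      by_cases hc : c = ' '
      · subst hc
        have hp : [' '].isPrefixOf (' ' :: rest) = true := by simp [List.isPrefixOf]
        rw [if_pos hp]
        simp only [List.length_singleton, List.drop_one, List.tail_cons]
        rw [ih rest _ (Nat.le_of_succ_le_succ (by simpa using h))]
        rw [show pvSplit1 (' ' :: rest) = ([], (pvSplit1 rest).1 :: (pvSplit1 rest).2) from by
          simp [pvSplit1]]
        rw [PySem.Chars.join_cons_cons]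
        simp
      · have hp : [' '].isPrefixOf (c :: rest) = false := by
          simp [List.isPrefixOf]; exact fun hh => absurd hh.symm hc
        rw [if_neg (by simp [hp])]
        rw [ih rest (c :: acc) (Nat.le_of_succ_le_succ (by simpa using h))]
        simp only [pvSplit1, hc, if_false, join_cons_head]
        simp

lemma chars_replace_space (s new : List Char) :
    PySem.Chars.replace s [' '] new =
      PySem.Chars.join new ((pvSplit1 s).1 :: (pvSplit1 s).2) := by
  rw [show PySem.Chars.replace s [' '] new = PySem.Chars.replace.go [' '] new s.length s [] from rfl]
  rw [replace_go_eq new _ _ _ (Nat.le_refl _)]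
  simp

lemma pvSplit1_fst (s : List Char) :
    (pvSplit1 s).1 = s.takeWhile (fun c => c ≠ ' ') := by
  induction s with
  | nil => rfl
  | cons c t ih =>
    by_cases h : c = ' ' <;> simp [pvSplit1, List.takeWhile, h, ih]

lemma snd_ne_nil_iff (s : List Char) :
    (pvSplit1 s).2 ≠ [] ↔ (s.takeWhile (fun c => c ≠ ' ')).length < s.length := by
  induction s with
  | nil => simp [pvSplit1]
  | cons c t ih =>
    by_cases h : c = ' '
    · simp [pvSplit1, List.takeWhile, h]
    · simp [pvSplit1, List.takeWhile, h, ih]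

lemma pvSplit1_eq_self (s : List Char) (h : (pvSplit1 s).2 = []) :
    (pvSplit1 s).1 = s := by
  induction s with
  | nil => rfl
  | cons c t ih =>
    by_cases hc : c = ' '
    · simp [pvSplit1, hc] at h
    · simp [pvSplit1, hc] at h ⊢; exact ih h

lemma drop_eq_tail (s : List Char) (h : (pvSplit1 s).2 ≠ []) :
    (pvSplit1 (s.drop ((s.takeWhile (fun c => c ≠ ' ')).length + 1))).1 ::
      (pvSplit1 (s.drop ((s.takeWhile (fun c => c ≠ ' ')).length + 1))).2 =
      (pvSplit1 s).2 := by
  induction s with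
  | nil => simp [pvSplit1] at h
  | cons c t ih =>
    by_cases hc : c = ' '
    · simp [pvSplit1, List.takeWhile, hc]
    · have h' : (pvSplit1 t).2 ≠ [] := by simpa [pvSplit1, hc] using h
      have hx := ih h'
      simp only [pvSplit1, hc, if_false, List.takeWhile,
        List.drop_succ_cons] at hx ⊢
      simpa [hc] using hx

lemma mem_space_iff (s : List Char) : ' ' ∈ s ↔ (pvSplit1 s).2 ≠ [] := by
  induction s with
  | nil => simp [pvSplit1]
  | cons c t ih =>
    by_cases hc : c = ' '
    · simp [pvSplit1, hc]
    · simp [pvSplit1, hc, ih]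
      exact fun h => absurd h.symm hc

lemma isIn_space (result : String) :
    PySem.Str.isIn " " result = decide ((pvSplit1 result.toList).2 ≠ []) := by
  rw [Bool.eq_iff_iff, decide_eq_true_iff, PySem.Str.isIn_iff_infix]
  rw [show (" " : String).toList = [' '] from rfl, List.singleton_infix_iff]
  exact mem_space_iff result.toList

-- the two fallback tails agree: A's for/else clause vs B's word-list tail
lemma fallback_eq_tail (result : String) :
    pvFallback result =
      pvTailB result (((pvSplit1 result.toList).1 :: (pvSplit1 result.toList).2).map
        String.ofList) := by
  unfold pvFallback pvTailB
  by_cases hsp : (pvSplit1 result.toList).2 = []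
  · have h1 : String.ofList (pvSplit1 result.toList).1 = result := by
      rw [pvSplit1_eq_self _ hsp, String.ofList_toList]
    rw [hsp]
    simp only [List.map_cons, List.map_nil, List.length_singleton, List.headD_cons, h1,
      isIn_space, hsp, ne_eq, not_true_eq_false, decide_false, Bool.not_false, Bool.true_and,
      beq_self_eq_true, Bool.true_and]
    by_cases hdot : PySem.Str.isIn "." result = true
    · rw [if_pos hdot, if_pos hdot]
    · rw [if_neg hdot, if_neg hdot]
      show build_search _ result "+" = _ ++ PySem.Str.join "+" [result]
      unfold build_search
      apply String.toList_inj.mp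
      simp only [String.toList_append, PySem.Str.toList_replace, PySem.Str.toList_join,
        List.map_cons, List.map_nil]
      rw [show (" " : String).toList = [' '] from rfl, chars_replace_space, hsp,
        PySem.Chars.join_singleton, PySem.Chars.join_singleton, pvSplit1_eq_self _ hsp]
  · have h2 : PySem.Str.isIn " " result = true := by
      rw [isIn_space]; simpa using hsp
    rw [h2]
    simp only [Bool.not_true, Bool.false_and, List.map_cons, List.length_cons]
    have h3 : ((((pvSplit1 result.toList).2.map String.ofList).length + 1 : Nat) == 1) = false := by
      simp only [beq_eq_false_iff_ne, ne_eq]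
      intro hh
      have : ((pvSplit1 result.toList).2.map String.ofList).length = 0 := by omega
      exact hsp (List.map_eq_nil_iff.mp (List.length_eq_zero_iff.mp this))
    rw [h3]
    simp only [Bool.false_and]
    show build_search _ result "+" = _ ++ PySem.Str.join "+" _
    unfold build_search
    apply String.toList_inj.mp
    simp only [String.toList_append, PySem.Str.toList_replace, PySem.Str.toList_join,
      List.map_map, List.map_cons]
    rw [show (" " : String).toList = [' '] from rfl, chars_replace_space]
    simp [Function.comp_def]

-- ===== VERDICT (by name: the statement is the Claim_ definition above) =====
theorem determine_url_spec : Claim_equal_determine_url := by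
  intro result _
  show determine_url result = determine_url_alt result
  unfold determine_url determine_url_alt
  by_cases hurl : PySem.Str.isIn "://" result = true
  · rw [if_pos hurl, if_pos hurl]
  · rw [if_neg hurl, if_neg hurl]
    rw [scan_eq result PREFIXES (by decide), chars_splitOn_space]
    by_cases hsp : (pvSplit1 result.toList).2 = []
    · have hlt : ¬ (result.toList.takeWhile (fun c => c ≠ ' ')).length < result.toList.length := by
        rw [← snd_ne_nil_iff]; simpa using hsp
      rw [if_neg hlt]
      have hlen : ¬ 1 < (((pvSplit1 result.toList).1 :: (pvSplit1 result.toList).2).map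
          String.ofList).length := by
        simp [hsp]
      rw [if_neg hlen]
      exact fallback_eq_tail result
    · have hlt : (result.toList.takeWhile (fun c => c ≠ ' ')).length < result.toList.length :=
        (snd_ne_nil_iff result.toList).mp hsp
      rw [if_pos hlt]
      have hlen : 1 < (((pvSplit1 result.toList).1 :: (pvSplit1 result.toList).2).map
          String.ofList).length := by
        simp only [List.map_cons, List.length_cons, Nat.lt_add_one_iff, Nat.succ_le_iff]
        simpa [List.length_pos_iff] using hsp
      rw [if_pos hlen]
      have hhead : (((pvSplit1 result.toList).1 :: (pvSplit1 result.toList).2).map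
          String.ofList).headD "" = String.ofList (result.toList.takeWhile (fun c => c ≠ ' ')) := by
        simp [pvSplit1_fst]
      rw [hhead]
      cases hl : PREFIXES.lookup (String.ofList (result.toList.takeWhile (fun c => c ≠ ' '))) with
      | none => exact fallback_eq_tail result
      | some v =>
        obtain ⟨sep, prfx⟩ := v
        show build_search prfx _ sep = prfx ++ PySem.Str.join sep _
        unfold build_search
        apply String.toList_inj.mp
        simp only [String.toList_append, PySem.Str.toList_replace, PySem.Str.toList_join,
          List.map_cons, List.tail_cons, List.map_map, String.toList_ofList]
        rw [show (" " : String).toList = [' '] from rfl, chars_replace_space, drop_eq_tail _ hsp]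
        simp [Function.comp_def]
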